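-- pv_equiv track=rewrite | github.com/MrBrantCode/unitest_baseline | mut_generate/mist_train_cf/cf_8708/solution.py | replace_hello
-- ===== SOURCE A (Python) =====
-- def replace_hello(string):
--     result = ""
--     sentences = string.split(".")
--
--     for sentence in sentences:
--         if sentence.startswith("Hello"):
--             modified_sentence = "Goodbye" + sentence[len("Hello"):]
--             result += modified_sentence
--         else:
--             result += sentence
--         result += "."
--
--     return result.rstrip(".")  # Remove the trailing period
-- ===== SOURCE B (Python) =====
-- def replace_hello(string):
--     out = []
--     boundary = True
--     i = 0
--     n = len(string)
--     while i < n: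
--         if boundary and string.startswith("Hello", i):
--             out.append("Goodbye")
--             i += 5
--             boundary = False
--         else:
--             c = string[i]
--             out.append(c)
--             boundary = c == "."
--             i += 1
--     return "".join(out).rstrip(".")
-- ===== Notes on version B (the rewrite author's own statement) =====
-- stated objective: alternative
-- what changed: B replaces A's split-on-period / per-sentence rebuild loop by a single left-to-right scan that substitutes 'Hello' only at the string start or immediately after a period, so no sentence list is built and the string is traversed once.
import Mathlib
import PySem

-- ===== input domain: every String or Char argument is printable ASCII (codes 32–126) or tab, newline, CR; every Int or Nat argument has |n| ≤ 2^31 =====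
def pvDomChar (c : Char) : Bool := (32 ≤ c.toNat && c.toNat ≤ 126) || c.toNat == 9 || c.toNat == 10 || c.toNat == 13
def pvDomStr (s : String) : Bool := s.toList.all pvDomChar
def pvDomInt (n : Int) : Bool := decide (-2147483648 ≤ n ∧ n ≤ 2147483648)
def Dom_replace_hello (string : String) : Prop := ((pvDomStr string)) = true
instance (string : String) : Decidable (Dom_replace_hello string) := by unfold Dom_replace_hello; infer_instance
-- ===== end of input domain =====

-- B replaces A's split-into-sentences / rebuild loop by a single left-to-right scan that
-- substitutes "Hello" only at the start or right after a period (objective: alternative, one pass, no sentence list).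
-- Both ports work on string.toList; Python's s.rstrip(".") (no PySem primitive strips a chosen
-- char set on the right only) is ported by hand as reverse/dropWhile/reverse — exact for any string.

def pvRstripDot (s : List Char) : List Char := (s.reverse.dropWhile (fun c => c == '.')).reverse

-- ===== PORT A =====
def replace_hello (string : String) : String :=
  let sentences := PySem.Chars.splitOn string.toList ['.']
  let result := sentences.foldl
    (fun result sentence =>
      (result ++
        (if PySem.Chars.startswith sentence ['H','e','l','l','o'] then
          ['G','o','o','d','b','y','e'] ++ PySem.List.slice sentence (some 5) none
        else sentence)) ++ ['.']) []
  String.mk (pvRstripDot result)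

-- ===== PORT B =====
def pvScan : Bool → List Char → List Char
  | _, [] => []
  | boundary, c :: cs =>
    if boundary && PySem.Chars.startswith (c :: cs) ['H','e','l','l','o'] then
      ['G','o','o','d','b','y','e'] ++ pvScan false (List.drop 4 cs)
    else
      c :: pvScan (c == '.') cs
termination_by _ l => l.length
decreasing_by
  · simp
  · simp

def replace_hello_alt (string : String) : String :=
  String.mk (pvRstripDot (pvScan true string.toList))

-- ===== PRECONDITION & SPEC =====
def Spec_replace_hello (string : String) (out : String) : Prop := out = replace_hello_alt string
instance (string : String) (out : String) : Decidable (Spec_replace_hello string out) := by unfold Spec_replace_hello; infer_instance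

-- ===== CLAIM (what is proved, stated in full; the proofs are below) =====
def Claim_equal_replace_hello : Prop := ∀ (string : String), Dom_replace_hello string → Spec_replace_hello string (replace_hello string)

-- ===== LEMMAS AND PROOFS =====

theorem pvScan_nil (b : Bool) : pvScan b [] = [] := by rw [pvScan.eq_def]

theorem pvScan_cons (b : Bool) (c : Char) (cs : List Char) :
    pvScan b (c :: cs) =
      if b && PySem.Chars.startswith (c :: cs) ['H','e','l','l','o'] then
        ['G','o','o','d','b','y','e'] ++ pvScan false (List.drop 4 cs)
      else c :: pvScan (c == '.') cs := by
  rw [pvScan.eq_def]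

-- sentence transformer of A, on char lists
def pvF (s : List Char) : List Char :=
  if PySem.Chars.startswith s ['H','e','l','l','o'] then
    ['G','o','o','d','b','y','e'] ++ PySem.List.slice s (some 5) none
  else s

-- reference splitter on '.' with an accumulator of the current (reversed) sentence
def pvSw (cur : List Char) : List Char → List (List Char)
  | [] => [cur.reverse]
  | c :: rest => if c = '.' then cur.reverse :: pvSw [] rest else pvSw (c :: cur) rest

theorem pvSplitOn_go_eq (fuel : Nat) (l cur : List Char) (acc : List (List Char))
    (h : l.length < fuel) :
    PySem.Chars.splitOn.go ['.'] fuel l cur acc = acc.reverse ++ pvSw cur l := by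
  induction fuel generalizing l cur acc with
  | zero => omega
  | succ n ih =>
    cases l with
    | nil => rw [PySem.Chars.splitOn.go.eq_def]; simp [pvSw]
    | cons c rest =>
      rw [PySem.Chars.splitOn.go.eq_def]
      simp only [List.isPrefixOf]
      by_cases hc : c = '.'
      · subst hc
        simp only [beq_self_eq_true, Bool.true_and, if_pos]
        rw [show List.drop (['.'] : List Char).length ('.' :: rest) = rest from rfl]
        rw [ih rest [] (cur.reverse :: acc) (by simp at h ⊢; omega)]
        simp [pvSw]
      · have hb : ('.' == c) = false := by
          simp only [beq_eq_false_iff_ne]; exact fun h' => hc h'.symm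
        simp only [hb, Bool.false_and, if_neg Bool.false_ne_true]
        rw [ih rest (c :: cur) acc (by simp at h ⊢; omega)]
        simp [pvSw, hc]

theorem pvSplitOn_eq (l : List Char) :
    PySem.Chars.splitOn l ['.'] = pvSw [] l := by
  unfold PySem.Chars.splitOn
  rw [pvSplitOn_go_eq (l.length + 1) l [] [] (by omega)]
  simp

theorem pvSw_dotfree (s : List Char) (hs : ∀ c ∈ s, c ≠ '.') (cur : List Char) :
    pvSw cur s = [cur.reverse ++ s] := by
  induction s generalizing cur with
  | nil => simp [pvSw]
  | cons c t ih =>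
    have hc : c ≠ '.' := hs c (by simp)
    simp only [pvSw, if_neg hc]
    rw [ih (fun x hx => hs x (by simp [hx])) (c :: cur)]
    simp

theorem pvSw_dot (s : List Char) (hs : ∀ c ∈ s, c ≠ '.') (u cur : List Char) :
    pvSw cur (s ++ '.' :: u) = (cur.reverse ++ s) :: pvSw [] u := by
  induction s generalizing cur with
  | nil => simp [pvSw]
  | cons c t ih =>
    have hc : c ≠ '.' := hs c (by simp)
    simp only [List.cons_append, pvSw, if_neg hc]
    rw [ih (fun x hx => hs x (by simp [hx])) (c :: cur)]
    simp

theorem pvScan_false_copy (t : List Char) (ht : ∀ c ∈ t, c ≠ '.') (u : List Char) :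
    pvScan false (t ++ u) = t ++ pvScan false u := by
  induction t with
  | nil => simp
  | cons c t' ih =>
    have hc : c ≠ '.' := ht c (by simp)
    rw [List.cons_append, pvScan_cons]
    simp only [Bool.false_and, if_neg Bool.false_ne_true]
    rw [beq_eq_false_iff_ne.mpr hc, ih (fun x hx => ht x (by simp [hx]))]
    simp

theorem pvScan_false_id (t : List Char) (ht : ∀ c ∈ t, c ≠ '.') :
    pvScan false t = t := by
  have := pvScan_false_copy t ht []
  simpa [pvScan_nil] using this

-- a sentence-initial "Hello" decision does not change when the rest of the string follows
theorem pvNoHello_ext (s : List Char)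
    (h : ¬ ['H','e','l','l','o'] <+: s) (u : List Char) :
    ¬ ['H','e','l','l','o'] <+: (s ++ '.' :: u) := by
  intro hp
  by_cases hlen : 5 ≤ s.length
  · apply h
    have := List.prefix_iff_eq_take.mp hp
    rw [List.take_append_of_le_length (by simpa using hlen)] at this
    exact List.prefix_iff_eq_take.mpr this
  · have hd : ('.' : Char) ∈ (['H','e','l','l','o'] : List Char) := by
      have hget : (s ++ '.' :: u)[s.length]'(by simp) = '.' := by simp
      have hEq := (hp.getElem (i := s.length) (by simp at hlen ⊢; omega)).trans hget
      rw [← hEq]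
      exact List.getElem_mem _
    simp at hd

theorem pvStartswith_hello (t : List Char) :
    PySem.Chars.startswith ('H'::'e'::'l'::'l'::'o'::t) ['H','e','l','l','o'] = true :=
  (PySem.Chars.startswith_iff _ _).mpr ⟨t, rfl⟩

theorem pvScan_true_dotfree (s : List Char) (hs : ∀ c ∈ s, c ≠ '.') :
    pvScan true s = pvF s := by
  by_cases h : PySem.Chars.startswith s ['H','e','l','l','o'] = true
  · obtain ⟨t, ht⟩ := (PySem.Chars.startswith_iff _ _).mp h
    subst ht
    rw [show (['H','e','l','l','o'] : List Char) ++ t = 'H'::'e'::'l'::'l'::'o'::t from rfl]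
    rw [pvScan_cons, pvStartswith_hello]
    simp only [Bool.true_and]
    have ht' : ∀ c ∈ t, c ≠ '.' := fun c hc => hs c (by simp [hc])
    rw [show List.drop 4 ('e'::'l'::'l'::'o'::t) = t from rfl, pvScan_false_id t ht']
    unfold pvF
    simp [pvStartswith_hello, PySem.List.slice_from _ (by norm_num : (0:Int) ≤ 5)]
  · cases s with
    | nil => simp [pvScan_nil, pvF, PySem.Chars.startswith]
    | cons c t =>
      rw [pvScan_cons, Bool.eq_false_iff.mpr h]
      simp only [Bool.true_and, if_neg Bool.false_ne_true]
      have hc : c ≠ '.' := hs c (by simp)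
      rw [beq_eq_false_iff_ne.mpr hc, pvScan_false_id t (fun x hx => hs x (by simp [hx]))]
      unfold pvF
      rw [Bool.eq_false_iff.mpr h]
      simp

theorem pvScan_true_dot (s : List Char) (hs : ∀ c ∈ s, c ≠ '.') (u : List Char) :
    pvScan true (s ++ '.' :: u) = pvF s ++ '.' :: pvScan true u := by
  by_cases h : PySem.Chars.startswith s ['H','e','l','l','o'] = true
  · obtain ⟨t, ht⟩ := (PySem.Chars.startswith_iff _ _).mp h
    subst ht
    rw [show (['H','e','l','l','o'] : List Char) ++ t ++ '.'::u
        = 'H'::'e'::'l'::'l'::'o'::(t ++ '.'::u) from by simp]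
    rw [pvScan_cons, pvStartswith_hello]
    simp only [Bool.true_and]
    have ht' : ∀ c ∈ t, c ≠ '.' := fun c hc => hs c (by simp [hc])
    rw [show List.drop 4 ('e'::'l'::'l'::'o'::(t ++ '.'::u)) = t ++ '.'::u from rfl]
    rw [pvScan_false_copy t ht', pvScan_cons]
    simp only [beq_self_eq_true, Bool.false_and, if_neg Bool.false_ne_true]
    unfold pvF
    simp [pvStartswith_hello, PySem.List.slice_from _ (by norm_num : (0:Int) ≤ 5)]
  · have hext : PySem.Chars.startswith (s ++ '.' :: u) ['H','e','l','l','o'] = false := by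
      rw [Bool.eq_false_iff]
      intro hp
      exact pvNoHello_ext s (fun hp' => h ((PySem.Chars.startswith_iff _ _).mpr hp')) u
        ((PySem.Chars.startswith_iff _ _).mp hp)
    cases s with
    | nil =>
      rw [List.nil_append, pvScan_cons]
      simp only [List.nil_append] at hext
      rw [hext]
      simp [pvF, PySem.Chars.startswith]
    | cons c t =>
      rw [List.cons_append, pvScan_cons]
      rw [show PySem.Chars.startswith (c :: (t ++ '.'::u)) ['H','e','l','l','o'] = false from by
        simpa using hext]
      simp only [Bool.and_false, if_neg Bool.false_ne_true]
      have hc : c ≠ '.' := hs c (by simp)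
      rw [beq_eq_false_iff_ne.mpr hc,
        pvScan_false_copy t (fun x hx => hs x (by simp [hx])), pvScan_cons]
      simp only [beq_self_eq_true, Bool.false_and, if_neg Bool.false_ne_true]
      unfold pvF
      rw [Bool.eq_false_iff.mpr h]
      simp

theorem pvDropWhile_head (p : Char → Bool) (l : List Char) (c : Char) (u : List Char)
    (h : List.dropWhile p l = c :: u) : p c = false := by
  induction l with
  | nil => simp at h
  | cons a t ih =>
    rw [List.dropWhile_cons] at h
    by_cases hp : p a = true
    · rw [if_pos hp] at h; exact ih h
    · rw [if_neg hp] at h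
      obtain ⟨rfl, -⟩ := List.cons.inj h
      exact Bool.eq_false_iff.mpr hp

-- main: A's join-with-periods of the transformed sentences is B's scan plus one trailing period
theorem pvMain (l : List Char) :
    (pvSw [] l).flatMap (fun s => pvF s ++ ['.']) = pvScan true l ++ ['.'] := by
  induction hn : l.length using Nat.strong_induction_on generalizing l with
  | _ n ih =>
    subst hn
    have htw : ∀ c ∈ l.takeWhile (fun c => c ≠ '.'), c ≠ '.' := by
      intro c hc
      simpa using List.mem_takeWhile_imp hc
    rcases hdrop : l.dropWhile (fun c => c ≠ '.') with _ | ⟨c, u⟩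
    · have hl : l = l.takeWhile (fun c => c ≠ '.') := by
        conv_lhs => rw [← List.takeWhile_append_dropWhile (p := fun c => c ≠ '.') (l := l)]
        rw [hdrop]; simp
      rw [hl, pvSw_dotfree _ htw, pvScan_true_dotfree _ htw]
      simp
    · have hc : c = '.' := by
        have hp := pvDropWhile_head _ l c u hdrop
        simpa using hp
      subst hc
      have hl : l = l.takeWhile (fun c => c ≠ '.') ++ '.' :: u := by
        conv_lhs => rw [← List.takeWhile_append_dropWhile (p := fun c => c ≠ '.') (l := l)]
        rw [hdrop]
      have hlen2 : u.length < l.length := by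
        conv_rhs => rw [hl]
        simp only [List.length_append, List.length_cons]
        omega
      rw [hl, pvSw_dot _ htw, pvScan_true_dot _ htw]
      simp only [List.flatMap_cons, List.reverse_nil, List.nil_append]
      rw [ih u.length hlen2 u rfl]
      simp

theorem pvRstripDot_append_dot (x : List Char) : pvRstripDot (x ++ ['.']) = pvRstripDot x := by
  unfold pvRstripDot
  simp

-- ===== VERDICT (by name: the statement is the Claim_ definition above) =====
theorem replace_hello_spec : Claim_equal_replace_hello := by
  intro s _
  unfold Spec_replace_hello replace_hello replace_hello_alt
  simp only []
  rw [pvSplitOn_eq]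
  have hfold : (pvSw [] s.toList).foldl
      (fun result sentence =>
        (result ++
          (if PySem.Chars.startswith sentence ['H','e','l','l','o'] then
            ['G','o','o','d','b','y','e'] ++ PySem.List.slice sentence (some 5) none
          else sentence)) ++ ['.']) [] =
      (pvSw [] s.toList).flatMap (fun t => pvF t ++ ['.']) := by
    have hstep : (fun (result : List Char) sentence =>
        (result ++
          (if PySem.Chars.startswith sentence ['H','e','l','l','o'] then
            ['G','o','o','d','b','y','e'] ++ PySem.List.slice sentence (some 5) none
          else sentence)) ++ ['.'])
        = fun (acc : List Char) t => acc ++ (pvF t ++ ['.']) := by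
      funext r t
      simp [pvF, List.append_assoc]
    rw [hstep, PySem.List.foldl_append_eq_flatMap (fun t => pvF t ++ ['.'])]
    simp
  rw [hfold, pvMain, pvRstripDot_append_dot]
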